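-- pv_equiv track=rewrite | github.com/Hanserfaust/pycats | pycats/pycats.py | _build_substrings
-- ===== SOURCE A (Python) =====
-- def _build_substrings(string, depth):
--     result = set()
--     words = string.split()
--
--     for d in range(0, depth):
--         for i in range(0, len(words)):
--             if i+d+1 > len(words):
--                 continue
--             current_words = words[i:i+d+1]
--             result.add(' '.join(current_words))
--     return result
-- ===== SOURCE B (Python) =====
-- def _build_substrings(string, depth):
--     # DP over window length: each row of length-(d+1) windows is built by
--     # extending the previous row's windows with one more word (zip), instead
--     # of slicing and joining from scratch for every (d, i) pair.
--     words = string.split()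
--     result = set()
--     prev = list(words)
--     for d in range(1, min(depth, len(words)) + 1):
--         for s in prev:
--             result.add(s)
--         prev = [p + ' ' + w for p, w in zip(prev, words[d:])]
--     return result
-- ===== Notes on version B (the rewrite author's own statement) =====
-- stated objective: faster
-- what changed: Replaces the slice-and-join-from-scratch double loop with a dynamic-programming row update: each row of length-(d+1) windows is built by zipping the previous row of windows with the shifted word list and appending one word, and the loop is capped at min(depth, len(words)) so empty rows are never scanned.
import Mathlib
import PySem

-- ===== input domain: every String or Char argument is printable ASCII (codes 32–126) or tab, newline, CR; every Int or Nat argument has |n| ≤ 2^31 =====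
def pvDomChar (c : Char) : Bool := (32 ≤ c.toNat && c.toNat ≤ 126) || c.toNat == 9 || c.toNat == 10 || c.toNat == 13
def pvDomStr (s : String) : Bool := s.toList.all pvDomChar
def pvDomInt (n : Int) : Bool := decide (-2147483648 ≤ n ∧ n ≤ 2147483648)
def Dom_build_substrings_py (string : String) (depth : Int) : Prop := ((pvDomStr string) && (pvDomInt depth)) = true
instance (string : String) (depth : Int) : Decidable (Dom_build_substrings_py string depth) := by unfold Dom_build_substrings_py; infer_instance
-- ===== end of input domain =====

-- B builds each row of windows from the previous row (DP) instead of slicing+joining from scratch; same result set.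

-- ===== PORT A =====
def build_substrings_py (string : String) (depth : Int) : List String :=
  let words := PySem.Str.split₀ string
  (PySem.List.pyRange 0 depth 1).foldl (fun result d =>
    (PySem.List.pyRange 0 (words.length : Int) 1).foldl (fun result i =>
      if i + d + 1 > (words.length : Int) then result
      else PySem.Set.add result (PySem.Str.join " " (PySem.List.slice words (some i) (some (i + d + 1)))))
      result) []

-- ===== PORT B =====
def build_substrings_py_alt (string : String) (depth : Int) : List String :=
  let words := PySem.Str.split₀ string
  let st := (PySem.List.pyRange 1 (min depth (words.length : Int) + 1) 1).foldl
    (fun (st : List String × List String) d =>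
      let result := st.2.foldl (fun r s => PySem.Set.add r s) st.1
      let prev := (st.2.zip (PySem.List.slice words (some d) none)).map (fun pw => pw.1 ++ " " ++ pw.2)
      (result, prev))
    ([], words)
  st.1

-- ===== PRECONDITION & SPEC =====
def Spec_build_substrings_py (string : String) (depth : Int) (out : List String) : Prop := out = build_substrings_py_alt string depth
instance (string : String) (depth : Int) (out : List String) : Decidable (Spec_build_substrings_py string depth out) := by unfold Spec_build_substrings_py; infer_instance

-- ===== CLAIM (what is proved, stated in full; the proofs are below) =====
def Claim_equal_build_substrings_py : Prop := ∀ (string : String) (depth : Int), Dom_build_substrings_py string depth → Spec_build_substrings_py string depth (build_substrings_py string depth)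

-- ===== LEMMAS AND PROOFS =====

-- window of k words starting at i, joined with spaces
def pvWin (ws : List String) (k i : Nat) : String :=
  PySem.Str.join " " ((ws.drop i).take k)

-- the row of all windows of length k (empty once k > ws.length)
def pvRow (ws : List String) (k : Nat) : List String :=
  (List.range (ws.length + 1 - k)).map (pvWin ws k)

-- rows of lengths 1..K accumulated into a Python set
def pvAcc (ws : List String) (K : Nat) : List String :=
  (List.range K).foldl (fun r t => (pvRow ws (t+1)).foldl PySem.Set.add r) []

theorem pv_join_snoc (sep x w : List Char) (xs : List (List Char)) :
    PySem.Chars.join sep ((x :: xs) ++ [w]) = PySem.Chars.join sep (x :: xs) ++ sep ++ w := by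
  induction xs generalizing x with
  | nil => simp [PySem.Chars.join_cons_cons, PySem.Chars.join_singleton]
  | cons y ys ih =>
      rw [List.cons_append, List.cons_append, PySem.Chars.join_cons_cons,
        ← List.cons_append, ih y, PySem.Chars.join_cons_cons]
      simp [List.append_assoc]

theorem pv_join_single (w : String) : PySem.Str.join " " [w] = w :=
  String.ext (by simp [PySem.Str.toList_join, PySem.Chars.join_singleton])

theorem pv_win_snoc (ws : List String) (k i : Nat) (hk : 1 ≤ k) (h : i + k < ws.length) :
    pvWin ws k i ++ " " ++ ws[i + k]'(by omega) = pvWin ws (k+1) i := by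
  have hlt : k < (ws.drop i).length := by simp [List.length_drop]; omega
  have htake : (ws.drop i).take (k+1) = (ws.drop i).take k ++ [(ws.drop i)[k]'hlt] := by
    rw [List.take_add_one, List.getElem?_eq_getElem hlt]; rfl
  have hget : (ws.drop i)[k]'hlt = ws[i + k]'(by omega) := by
    simp [List.getElem_drop]
  have hne : (ws.drop i).take k ≠ [] := by
    have hl : ((ws.drop i).take k).length = k := by simp [List.length_take]; omega
    intro h0; rw [h0] at hl; simp at hl; omega
  obtain ⟨x, xs, hx⟩ := List.exists_cons_of_ne_nil hne
  apply String.ext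
  simp only [String.toList_append, PySem.Str.toList_join, pvWin, htake, hget, hx,
    List.map_append, List.map_cons, List.map_nil]
  rw [pv_join_snoc]

theorem pv_row_one (ws : List String) : pvRow ws 1 = ws := by
  apply List.ext_getElem
  · simp [pvRow]
  · intro i h1 h2
    have hlt : 0 < (ws.drop i).length := by simp [List.length_drop]; simp [pvRow] at h1; omega
    have h1' : (ws.drop i).take 1 = [(ws.drop i)[0]'hlt] := by
      rw [List.take_add_one, List.getElem?_eq_getElem hlt]; rfl
    simp only [pvRow, pvWin, List.getElem_map, List.getElem_range, h1', pv_join_single]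
    simp [List.getElem_drop]

theorem pv_row_zip (ws : List String) (k : Nat) (hk : 1 ≤ k) (hkn : k ≤ ws.length) :
    ((pvRow ws k).zip (ws.drop k)).map (fun pw => pw.1 ++ " " ++ pw.2) = pvRow ws (k+1) := by
  apply List.ext_getElem
  · simp [pvRow]; omega
  · intro i h1 h2
    have hi : i + k < ws.length := by
      simp [pvRow] at h1; omega
    simp only [List.getElem_map, List.getElem_zip, pvRow, List.getElem_range,
      List.getElem_drop]
    have := pv_win_snoc ws k i hk hi
    simpa [Nat.add_comm k i] using this

theorem pv_A_inner (ws : List String) (dk : Nat) (r : List String) :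
    (PySem.List.pyRange 0 (ws.length : Int) 1).foldl
      (fun r i => if i + (dk : Int) + 1 > (ws.length : Int) then r
        else PySem.Set.add r
          (PySem.Str.join " " (PySem.List.slice ws (some i) (some (i + (dk : Int) + 1))))) r
    = (pvRow ws (dk+1)).foldl PySem.Set.add r := by
  rw [PySem.List.foldl_congr_mem _ _
    (fun r i => if (i + (dk : Int) + 1 ≤ (ws.length : Int)) then
        PySem.Set.add r (PySem.Str.join " " (PySem.List.slice ws (some i) (some (i + (dk : Int) + 1))))
      else r) r
    (by
      intro acc x _
      beta_reduce
      by_cases hc : x + (dk : Int) + 1 ≤ (ws.length : Int)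
      · rw [if_neg (by omega), if_pos hc]
      · rw [if_pos (by omega), if_neg hc])]
  rw [PySem.List.foldl_ite_eq_foldl_filter]
  have hfilter : (PySem.List.pyRange 0 (ws.length : Int) 1).filter
      (fun i => decide (i + (dk : Int) + 1 ≤ (ws.length : Int)))
      = PySem.List.pyRange 0 ((ws.length - dk : Nat) : Int) 1 := by
    rw [PySem.List.pyRange_one_append 0 ((ws.length - dk : Nat) : Int) (ws.length : Int)
      (by positivity) (by exact_mod_cast Nat.sub_le _ _), List.filter_append]
    have h1 : (PySem.List.pyRange 0 ((ws.length - dk : Nat) : Int) 1).filter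
        (fun i => decide (i + (dk : Int) + 1 ≤ (ws.length : Int)))
        = PySem.List.pyRange 0 ((ws.length - dk : Nat) : Int) 1 := by
      apply List.filter_eq_self.mpr
      intro a ha
      have hm := PySem.List.mem_pyRange_one.mp ha
      rw [decide_eq_true_eq]
      omega
    have h2 : (PySem.List.pyRange ((ws.length - dk : Nat) : Int) (ws.length : Int) 1).filter
        (fun i => decide (i + (dk : Int) + 1 ≤ (ws.length : Int)))
        = [] := by
      apply List.filter_eq_nil_iff.mpr
      intro a ha
      have hm := PySem.List.mem_pyRange_one.mp ha
      rw [decide_eq_true_eq]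
      omega
    rw [h1, h2, List.append_nil]
  rw [hfilter, PySem.List.pyRange_zero_natCast, List.foldl_map]
  have hrow : pvRow ws (dk+1) = List.map (pvWin ws (dk+1)) (List.range (ws.length - dk)) := by
    unfold pvRow
    rw [show ws.length + 1 - (dk+1) = ws.length - dk from by omega]
  rw [hrow, List.foldl_map]
  apply PySem.List.foldl_congr_mem
  intro acc k _
  congr 1
  unfold pvWin
  have h := PySem.List.slice_natCast_add ws k (dk+1)
  push_cast at h
  rw [show ((k : Int) + (dk : Int) + 1) = (k : Int) + ((dk : Int) + 1) from by ring, h]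

theorem pv_A_outer_id (ws : List String) (d : Int) (h0 : 0 ≤ d) (hd : (ws.length : Int) ≤ d)
    (r : List String) :
    (PySem.List.pyRange 0 (ws.length : Int) 1).foldl
      (fun r i => if i + d + 1 > (ws.length : Int) then r
        else PySem.Set.add r
          (PySem.Str.join " " (PySem.List.slice ws (some i) (some (i + d + 1))))) r = r := by
  have h := pv_A_inner ws d.toNat r
  simp only [Int.toNat_of_nonneg h0] at h
  rw [h]
  have hempty : pvRow ws (d.toNat + 1) = [] := by
    unfold pvRow
    rw [show ws.length + 1 - (d.toNat + 1) = 0 from by omega]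
    rfl
  rw [hempty]
  rfl

theorem pv_A_eq (string : String) (depth : Int) :
    build_substrings_py string depth
    = pvAcc (PySem.Str.split₀ string) (min depth ((PySem.Str.split₀ string).length : Int)).toNat := by
  unfold build_substrings_py
  by_cases hd : depth ≤ 0
  · rw [PySem.List.pyRange_one_eq_nil hd,
      show (min depth ((PySem.Str.split₀ string).length : Int)).toNat = 0 from by omega]
    rfl
  · push Not at hd
    have h0 : 0 ≤ min depth (((PySem.Str.split₀ string).length : Int)) := by omega
    rw [PySem.List.pyRange_one_append 0 (min depth (((PySem.Str.split₀ string).length : Int))) depth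
      (by omega) (by omega), List.foldl_append]
    rw [PySem.List.foldl_congr_mem
      (PySem.List.pyRange (min depth (((PySem.Str.split₀ string).length : Int))) depth 1)
      _ (fun acc _ => acc) _
      (by
        intro acc x hx
        have hm := PySem.List.mem_pyRange_one.mp hx
        beta_reduce
        exact pv_A_outer_id (PySem.Str.split₀ string) x (by omega) (by omega) acc),
      PySem.List.foldl_ignore]
    rw [show min depth (((PySem.Str.split₀ string).length : Int))
        = (((min depth (((PySem.Str.split₀ string).length : Int))).toNat : Nat) : Int)
      from (Int.toNat_of_nonneg h0).symm,
      PySem.List.pyRange_zero_natCast ((min depth (((PySem.Str.split₀ string).length : Int))).toNat),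
      List.foldl_map]
    simp only [Int.toNat_natCast]
    unfold pvAcc
    apply PySem.List.foldl_congr_mem
    intro acc k _
    exact pv_A_inner (PySem.Str.split₀ string) k acc

theorem pv_B_inv (ws : List String) (t : Nat) (ht : t ≤ ws.length) :
    ((List.range t).map (fun k : Nat => 1 + (k : Int))).foldl
      (fun (st : List String × List String) d =>
        (st.2.foldl (fun r s => PySem.Set.add r s) st.1,
         (st.2.zip (PySem.List.slice ws (some d) none)).map (fun pw => pw.1 ++ " " ++ pw.2)))
      ([], ws)
    = (pvAcc ws t, pvRow ws (t+1)) := by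
  induction t with
  | zero =>
      simp only [List.range_zero, List.map_nil, List.foldl_nil]
      refine Prod.ext ?_ (by exact (pv_row_one ws).symm)
      rfl
  | succ t ih =>
      rw [List.range_succ, List.map_append, List.foldl_append, ih (by omega)]
      simp only [List.map_cons, List.map_nil, List.foldl_cons, List.foldl_nil]
      refine Prod.ext ?_ ?_
      · show (pvRow ws (t+1)).foldl (fun r s => PySem.Set.add r s) (pvAcc ws t) = pvAcc ws (t+1)
        rw [pvAcc, pvAcc, List.range_succ, List.foldl_append, List.foldl_cons, List.foldl_nil]
      · show ((pvRow ws (t+1)).zip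
            (PySem.List.slice ws (some (1 + (t : Int))) none)).map (fun pw => pw.1 ++ " " ++ pw.2)
          = pvRow ws (t+2)
        rw [show (1 + (t : Int)) = ((t + 1 : Nat) : Int) from by push_cast; ring,
          PySem.List.slice_from_natCast]
        exact pv_row_zip ws (t+1) (by omega) (by omega)

theorem pv_B_eq (string : String) (depth : Int) :
    build_substrings_py_alt string depth
    = pvAcc (PySem.Str.split₀ string) (min depth ((PySem.Str.split₀ string).length : Int)).toNat := by
  simp only [build_substrings_py_alt]
  by_cases hd : min depth ((PySem.Str.split₀ string).length : Int) + 1 ≤ 1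
  · rw [PySem.List.pyRange_one_eq_nil hd,
      show (min depth ((PySem.Str.split₀ string).length : Int)).toNat = 0 from by omega]
    rfl
  · push Not at hd
    rw [PySem.List.pyRange_one,
      show (min depth ((PySem.Str.split₀ string).length : Int) + 1 - 1).toNat
        = (min depth ((PySem.Str.split₀ string).length : Int)).toNat from by omega,
      pv_B_inv (PySem.Str.split₀ string) _ (by omega)]

-- ===== VERDICT (by name: the statement is the Claim_ definition above) =====
theorem build_substrings_py_spec : Claim_equal_build_substrings_py := by
  intro string depth _
  unfold Spec_build_substrings_py
  rw [pv_A_eq, pv_B_eq]
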